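-- pv_equiv track=rewrite | github.com/Krzysiek-Mistrz/algorithms | src/alg-20-bigger-word.py | ktoreWieksze
-- ===== SOURCE A (Python) =====
-- def ktoreWieksze(slowo1, slowo2):
--     for i in range(min(len(slowo1), len(slowo2))):
--         if slowo1[i].lower() < slowo2[i].lower():
--             return slowo2
--         elif slowo1[i].lower() > slowo2[i].lower():
--             return slowo1
--     if len(slowo1) < len(slowo2):
--         return slowo2
--     else:
--         return slowo1
-- ===== SOURCE B (Python) =====
-- def ktoreWieksze(slowo1, slowo2):
--     return slowo2 if slowo1.lower() < slowo2.lower() else slowo1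
-- ===== Notes on version B (the rewrite author's own statement) =====
-- stated objective: faster
-- what changed: Replaced the explicit per-index character loop and separate length tiebreak with a single built-in lexicographic comparison of the two whole-string lowercased words (C-level str.lower and str.< instead of a Python-level loop).
import Mathlib
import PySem

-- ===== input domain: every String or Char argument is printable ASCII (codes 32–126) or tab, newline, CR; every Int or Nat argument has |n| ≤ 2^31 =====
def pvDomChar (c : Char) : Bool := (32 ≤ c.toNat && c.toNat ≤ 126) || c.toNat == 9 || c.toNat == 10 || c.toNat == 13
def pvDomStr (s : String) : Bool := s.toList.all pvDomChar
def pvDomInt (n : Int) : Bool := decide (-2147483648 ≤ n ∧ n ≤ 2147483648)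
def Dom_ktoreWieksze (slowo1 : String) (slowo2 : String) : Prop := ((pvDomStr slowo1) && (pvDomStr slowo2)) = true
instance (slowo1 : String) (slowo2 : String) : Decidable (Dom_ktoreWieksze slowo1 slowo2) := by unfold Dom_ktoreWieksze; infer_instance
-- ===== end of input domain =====

-- B replaces A's explicit per-index loop + length tiebreak by one built-in lexicographic
-- comparison of the lowercased words (idiomatic; same return value, no side effects).

-- ===== PORT A =====
-- the 'for i in range(min(len,len))' loop: walks both character lists in step,
-- early return on the first differing lowercased character, else length tiebreak
def ktoreWiekszeLoop (slowo1 : String) (slowo2 : String) : List Char → List Char → String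
  | c1 :: t1, c2 :: t2 =>
    if PySem.Chars.lowerChar c1 < PySem.Chars.lowerChar c2 then slowo2
    else if PySem.Chars.lowerChar c2 < PySem.Chars.lowerChar c1 then slowo1
    else ktoreWiekszeLoop slowo1 slowo2 t1 t2
  | _, _ => if PySem.Str.len slowo1 < PySem.Str.len slowo2 then slowo2 else slowo1

def ktoreWieksze (slowo1 : String) (slowo2 : String) : String :=
  ktoreWiekszeLoop slowo1 slowo2 slowo1.toList slowo2.toList

-- ===== PORT B =====
-- Python's built-in str '<' is code-point lexicographic; ported exactly as
-- lexicographic '<' on the character lists (Lean: String.lt_iff_toList_lt)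
def ktoreWieksze_alt (slowo1 : String) (slowo2 : String) : String :=
  let a := PySem.Str.lower slowo1
  let b := PySem.Str.lower slowo2
  if a.toList < b.toList then slowo2 else slowo1

-- ===== PRECONDITION & SPEC =====
def Spec_ktoreWieksze (slowo1 : String) (slowo2 : String) (out : String) : Prop := out = ktoreWieksze_alt slowo1 slowo2
instance (slowo1 : String) (slowo2 : String) (out : String) : Decidable (Spec_ktoreWieksze slowo1 slowo2 out) := by unfold Spec_ktoreWieksze; infer_instance

-- ===== CLAIM (what is proved, stated in full; the proofs are below) =====
def Claim_equal_ktoreWieksze : Prop := ∀ (slowo1 : String) (slowo2 : String), Dom_ktoreWieksze slowo1 slowo2 → Spec_ktoreWieksze slowo1 slowo2 (ktoreWieksze slowo1 slowo2)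

-- ===== LEMMAS AND PROOFS =====
theorem ktoreWiekszeLoop_eq (slowo1 slowo2 : String) (l1 l2 : List Char)
    (h : PySem.Str.len slowo1 < PySem.Str.len slowo2 ↔ l1.length < l2.length) :
    ktoreWiekszeLoop slowo1 slowo2 l1 l2 =
      if l1.map PySem.Chars.lowerChar < l2.map PySem.Chars.lowerChar then slowo2 else slowo1 := by
  induction l1 generalizing l2 with
  | nil =>
    cases l2 with
    | nil =>
      simp only [ktoreWiekszeLoop, List.map_nil]
      rw [if_neg (by simp [PySem.Str.len] at h ⊢; omega), if_neg (by exact fun hc => (List.lt_irrefl _ hc))]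
    | cons c2 t2 =>
      simp only [ktoreWiekszeLoop, List.map_nil, List.map_cons]
      rw [if_pos (by simp [PySem.Str.len] at h ⊢; omega), if_pos (List.nil_lt_cons _ _)]
  | cons c1 t1 ih =>
    cases l2 with
    | nil =>
      simp only [ktoreWiekszeLoop, List.map_cons, List.map_nil]
      rw [if_neg (by simp [PySem.Str.len] at h ⊢; omega), if_neg (by exact fun hc => (List.not_lt_nil _ hc))]
    | cons c2 t2 =>
      simp only [ktoreWiekszeLoop, List.map_cons]
      rcases lt_trichotomy (PySem.Chars.lowerChar c1) (PySem.Chars.lowerChar c2) with hlt | heq | hgt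
      · rw [if_pos hlt, if_pos (List.cons_lt_cons_iff.mpr (Or.inl hlt))]
      · rw [if_neg (not_lt.mpr heq.le), if_neg (not_lt.mpr heq.ge), ih t2 (by simp [PySem.Str.len] at h ⊢; omega)]
        by_cases ht : t1.map PySem.Chars.lowerChar < t2.map PySem.Chars.lowerChar
        · rw [if_pos ht, if_pos (List.cons_lt_cons_iff.mpr (Or.inr ⟨heq, ht⟩))]
        · rw [if_neg ht, if_neg (fun hc => by
            rcases List.cons_lt_cons_iff.mp hc with h1 | ⟨_, h2⟩
            · exact lt_irrefl _ (heq ▸ h1)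
            · exact ht h2)]
      · rw [if_neg (not_lt.mpr hgt.le), if_pos hgt, if_neg (fun hc => by
          rcases List.cons_lt_cons_iff.mp hc with h1 | ⟨h1, _⟩
          · exact lt_asymm hgt h1
          · exact lt_irrefl _ (h1 ▸ hgt))]

-- ===== VERDICT (by name: the statement is the Claim_ definition above) =====
theorem ktoreWieksze_spec : Claim_equal_ktoreWieksze := by
  intro slowo1 slowo2 _
  unfold Spec_ktoreWieksze ktoreWieksze ktoreWieksze_alt
  rw [ktoreWiekszeLoop_eq slowo1 slowo2 _ _ (by simp [PySem.Str.len])]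
  simp only [PySem.Str.toList_lower, PySem.Chars.lower]
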